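-- pv_equiv track=rewrite | github.com/firiatMoon/BlockChain | blockchain.py | in_chain
-- ===== SOURCE A (Python) =====
-- def in_chain(id_data, list_data):
--     all_blocks_in_chain = set()
--     for i in range(1, len(list_data)):
--         for j in range(len(list_data[i])):
--             if list_data[i][j] not in all_blocks_in_chain:
--                 all_blocks_in_chain.add(list_data[i][j])
--     if id_data not in all_blocks_in_chain:
--         return True
--     return False
-- ===== SOURCE B (Python) =====
-- def in_chain(id_data, list_data):
--     # Sort all elements of the tail blocks, then locate id_data by binary search
--     # (hand-rolled lower bound); True iff it is not found.
--     flat = sorted(x for block in list_data[1:] for x in block)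
--     lo, hi = 0, len(flat)
--     while lo < hi:
--         mid = (lo + hi) // 2
--         if flat[mid] < id_data:
--             lo = mid + 1
--         else:
--             hi = mid
--     return not (lo < len(flat) and flat[lo] == id_data)
-- ===== Notes on version B (the rewrite author's own statement) =====
-- stated objective: alternative
-- what changed: Replaced A's hash-set accumulation and single membership query with sort-then-binary-search: B flattens the tail blocks, sorts them, and runs a hand-rolled lower-bound binary search for id_data.
import Mathlib
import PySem

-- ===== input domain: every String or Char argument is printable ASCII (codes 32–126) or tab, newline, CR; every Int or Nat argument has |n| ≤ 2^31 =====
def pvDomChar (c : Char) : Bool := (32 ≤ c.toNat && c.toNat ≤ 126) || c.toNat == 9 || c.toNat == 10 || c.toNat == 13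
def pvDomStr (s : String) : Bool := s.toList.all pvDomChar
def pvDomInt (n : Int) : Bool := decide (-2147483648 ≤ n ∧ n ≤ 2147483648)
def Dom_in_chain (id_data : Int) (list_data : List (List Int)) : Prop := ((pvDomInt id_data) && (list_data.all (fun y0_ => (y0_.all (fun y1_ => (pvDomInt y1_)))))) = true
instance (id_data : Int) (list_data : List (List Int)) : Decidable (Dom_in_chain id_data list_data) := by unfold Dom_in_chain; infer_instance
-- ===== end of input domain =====

-- B replaces A's accumulator set with sort-then-binary-search over the flattened tail blocks (alternative algorithm, similar cost).


-- ===== PORT A =====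
-- Literal port: builds the set over range(1, len(list_data)) × range(len(block)), then queries it.
def in_chain (id_data : Int) (list_data : List (List Int)) : Bool :=
  let all_blocks_in_chain : PySem.Set Int :=
    (PySem.List.pyRange 1 list_data.length 1).foldl
      (fun acc i =>
        (PySem.List.pyRange 0 (PySem.List.pyGetD list_data i []).length 1).foldl
          (fun acc2 j =>
            if PySem.Set.contains acc2 (PySem.List.pyGetD (PySem.List.pyGetD list_data i []) j 0) then acc2
            else PySem.Set.add acc2 (PySem.List.pyGetD (PySem.List.pyGetD list_data i []) j 0))
          acc)
      PySem.Set.empty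
  if !(PySem.Set.contains all_blocks_in_chain id_data) then true else false

-- ===== PORT B =====
-- B's while-loop: lower-bound binary search on flat for id; all indices are in-range Nats, so getD is exact.
def pvBsearch (flat : List Int) (id : Int) (lo hi : Nat) : Nat :=
  if _h : lo < hi then
    let mid := (lo + hi) / 2
    if flat.getD mid 0 < id then pvBsearch flat id (mid + 1) hi
    else pvBsearch flat id lo mid
  else lo
termination_by hi - lo
decreasing_by all_goals omega

-- list_data[1:] is List.drop 1 (exact for a nonnegative slice start); the generator flattens the tail blocks.
def in_chain_alt (id_data : Int) (list_data : List (List Int)) : Bool :=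
  let flat := PySem.List.sorted ((list_data.drop 1).flatMap (fun b => b)) (fun x => x) false
  let lo := pvBsearch flat id_data 0 flat.length
  !(decide (lo < flat.length) && (flat.getD lo 0 == id_data))

-- ===== PRECONDITION & SPEC =====
def Spec_in_chain (id_data : Int) (list_data : List (List Int)) (out : Bool) : Prop := out = in_chain_alt id_data list_data
instance (id_data : Int) (list_data : List (List Int)) (out : Bool) : Decidable (Spec_in_chain id_data list_data out) := by unfold Spec_in_chain; infer_instance

-- ===== CLAIM =====
def Claim_equal_in_chain : Prop := ∀ (id_data : Int) (list_data : List (List Int)), Dom_in_chain id_data list_data → Spec_in_chain id_data list_data (in_chain id_data list_data)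

-- ===== LEMMAS AND PROOFS =====

-- A's redundant membership guard is exactly Set.add's own guard.
theorem pv_guard_add (s : PySem.Set Int) (x : Int) :
    (if PySem.Set.contains s x then s else PySem.Set.add s x) = PySem.Set.add s x := by
  by_cases h : PySem.Set.contains s x <;> simp [PySem.Set.add]

-- Fetching indices 1..len-1 yields the tail of the list.
theorem pv_fetch_drop (xs : List (List Int)) (d : List Int) :
    (PySem.List.pyRange 1 xs.length 1).map (fun i => PySem.List.pyGetD xs i d) = xs.drop 1 := by
  cases xs with
  | nil => rw [PySem.List.pyRange_one]; simp
  | cons h t =>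
    rw [PySem.List.pyRange_one]
    simp only [List.length_cons, List.drop_succ_cons, List.drop_zero, Nat.cast_add,
      Nat.cast_one, add_sub_cancel_right, Int.toNat_natCast, List.map_map]
    apply List.ext_getElem (by simp)
    intro k hk _
    simp only [List.getElem_map, List.getElem_range, Function.comp_apply]
    have h1 : (0:Int) ≤ 1 + (k:Int) := by omega
    rw [PySem.List.pyGetD, PySem.List.pyGet?_of_nonneg _ h1]
    have : ((1 + (k:Int)).toNat) = k + 1 := by omega
    rw [this]
    simp at hk
    simp [hk]

-- A's inner index loop over a block is Set.update with that block.
theorem pv_inner_update (blk : List Int) (acc : PySem.Set Int) :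
    (PySem.List.pyRange 0 blk.length 1).foldl
      (fun acc2 j =>
        if PySem.Set.contains acc2 (PySem.List.pyGetD blk j 0) then acc2
        else PySem.Set.add acc2 (PySem.List.pyGetD blk j 0)) acc
      = PySem.Set.update acc blk := by
  have hmap := PySem.List.map_pyGetD_pyRange_zero' blk (0 : Int)
  calc (PySem.List.pyRange 0 blk.length 1).foldl
        (fun acc2 j =>
          if PySem.Set.contains acc2 (PySem.List.pyGetD blk j 0) then acc2
          else PySem.Set.add acc2 (PySem.List.pyGetD blk j 0)) acc
      = ((PySem.List.pyRange 0 blk.length 1).map (fun j => PySem.List.pyGetD blk j 0)).foldl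
          (fun acc2 x => if PySem.Set.contains acc2 x then acc2 else PySem.Set.add acc2 x) acc := by
        rw [List.foldl_map]
    _ = blk.foldl (fun acc2 x => if PySem.Set.contains acc2 x then acc2 else PySem.Set.add acc2 x) acc := by
        rw [hmap]
    _ = blk.foldl PySem.Set.add acc := by
        congr 1; funext s x; exact pv_guard_add s x
    _ = PySem.Set.update acc blk := rfl

-- Membership in the set accumulated by repeated Set.update.
theorem pv_mem_foldl_update (bs : List (List Int)) (acc : PySem.Set Int) (v : Int) :
    v ∈ bs.foldl PySem.Set.update acc ↔ v ∈ acc ∨ ∃ b ∈ bs, v ∈ b := by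
  induction bs generalizing acc with
  | nil => simp
  | cons b bs ih =>
    simp only [List.foldl_cons, ih, PySem.Set.mem_update, List.mem_cons]
    constructor
    · rintro (⟨h | h⟩ | ⟨c, hc, hv⟩)
      · exact Or.inl h
      · exact Or.inr ⟨b, Or.inl rfl, h⟩
      · exact Or.inr ⟨c, Or.inr hc, hv⟩
    · rintro (h | ⟨c, rfl | hc, hv⟩)
      · exact Or.inl (Or.inl h)
      · exact Or.inl (Or.inr hv)
      · exact Or.inr ⟨c, hc, hv⟩

-- getD at an in-range index is getElem.
theorem pv_getD_eq (flat : List Int) (i : Nat) (h : i < flat.length) :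
    flat.getD i 0 = flat[i] := List.getD_eq_getElem flat 0 h

-- Lower-bound invariant of the binary search on a sorted list: the result r keeps everything
-- below r strictly less than id and everything from r on at least id.
theorem pvBsearch_inv (flat : List Int) (id : Int)
    (hs : flat.Pairwise (· ≤ ·)) :
    ∀ fuel lo hi, hi - lo ≤ fuel → lo ≤ hi → hi ≤ flat.length →
    (∀ i, i < lo → flat.getD i 0 < id) →
    (∀ i, hi ≤ i → i < flat.length → id ≤ flat.getD i 0) →
    pvBsearch flat id lo hi ≤ flat.length ∧
    (∀ i, i < pvBsearch flat id lo hi → flat.getD i 0 < id) ∧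
    (∀ i, pvBsearch flat id lo hi ≤ i → i < flat.length → id ≤ flat.getD i 0) := by
  have hmono : ∀ i j : Nat, i ≤ j → j < flat.length → flat.getD i 0 ≤ flat.getD j 0 := by
    intro i j hij hj
    rcases Nat.eq_or_lt_of_le hij with rfl | hlt
    · exact le_refl _
    · rw [pv_getD_eq flat i (by omega), pv_getD_eq flat j hj]
      exact (List.pairwise_iff_getElem.mp hs) i j (by omega) hj hlt
  intro fuel
  induction fuel with
  | zero =>
    intro lo hi hf hlh hhl hlow hup
    have : lo = hi := by omega
    subst this
    rw [pvBsearch]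
    simp only [lt_irrefl, dite_false]
    exact ⟨by omega, hlow, hup⟩
  | succ n ih =>
    intro lo hi hf hlh hhl hlow hup
    rw [pvBsearch]
    by_cases h : lo < hi
    · simp only [h, dite_true]
      by_cases hc : flat.getD ((lo + hi) / 2) 0 < id
      · simp only [hc, if_true]
        refine ih ((lo + hi) / 2 + 1) hi (by omega) (by omega) hhl ?_ hup
        intro i hi'
        by_cases hil : i < lo
        · exact hlow i hil
        · exact lt_of_le_of_lt (hmono i ((lo + hi) / 2) (by omega) (by omega)) hc
      · simp only [hc, if_false]
        refine ih lo ((lo + hi) / 2) (by omega) (by omega) (by omega) hlow ?_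
        intro i hi1 hi2
        exact le_trans (not_lt.mp hc) (hmono ((lo + hi) / 2) i hi1 hi2)
    · simp only [h, dite_false]
      have heq : lo = hi := by omega
      subst heq
      exact ⟨by omega, hlow, hup⟩

-- On a sorted list, the lower-bound test "lo < len ∧ flat[lo] = id" decides membership of id.
theorem pvBsearch_found_iff (flat : List Int) (id : Int)
    (hs : flat.Pairwise (· ≤ ·)) :
    ((pvBsearch flat id 0 flat.length < flat.length) ∧
      flat.getD (pvBsearch flat id 0 flat.length) 0 = id) ↔ id ∈ flat := by
  obtain ⟨hr, hlow, hup⟩ := pvBsearch_inv flat id hs (flat.length) 0 flat.length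
    (by omega) (by omega) (le_refl _) (by omega) (by omega)
  set r := pvBsearch flat id 0 flat.length with hrdef
  constructor
  · rintro ⟨h1, h2⟩
    rw [pv_getD_eq flat r h1] at h2
    exact h2 ▸ List.getElem_mem h1
  · intro hm
    obtain ⟨k, hk, hke⟩ := List.mem_iff_getElem.mp hm
    have hkr : ¬ k < r := by
      intro hkr
      have := hlow k hkr
      rw [pv_getD_eq flat k hk, hke] at this
      omega
    have h1 : r < flat.length := by omega
    refine ⟨h1, le_antisymm ?_ ?_⟩
    · -- flat[r] ≤ flat[k] = id
      rcases Nat.eq_or_lt_of_le (not_lt.mp hkr) with rfl | hlt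
      · rw [pv_getD_eq flat r h1]; exact le_of_eq hke
      · rw [pv_getD_eq flat r h1]
        calc flat[r] ≤ flat[k] := (List.pairwise_iff_getElem.mp hs) r k h1 hk hlt
          _ = id := hke
    · exact hup r (le_refl _) h1

-- ===== VERDICT =====
theorem in_chain_spec : Claim_equal_in_chain := by
  intro id_data list_data _
  unfold Spec_in_chain in_chain in_chain_alt
  -- A's set holds exactly the elements of the tail blocks.
  have houter :
      (PySem.List.pyRange 1 list_data.length 1).foldl
        (fun acc i =>
          (PySem.List.pyRange 0 (PySem.List.pyGetD list_data i []).length 1).foldl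
            (fun acc2 j =>
              if PySem.Set.contains acc2 (PySem.List.pyGetD (PySem.List.pyGetD list_data i []) j 0) then acc2
              else PySem.Set.add acc2 (PySem.List.pyGetD (PySem.List.pyGetD list_data i []) j 0))
            acc)
        PySem.Set.empty
      = (list_data.drop 1).foldl PySem.Set.update PySem.Set.empty := by
    have hstep :
        (fun (acc : PySem.Set Int) (i : Int) =>
          (PySem.List.pyRange 0 (PySem.List.pyGetD list_data i []).length 1).foldl
            (fun acc2 j =>
              if PySem.Set.contains acc2 (PySem.List.pyGetD (PySem.List.pyGetD list_data i []) j 0) then acc2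
              else PySem.Set.add acc2 (PySem.List.pyGetD (PySem.List.pyGetD list_data i []) j 0))
            acc)
        = (fun (acc : PySem.Set Int) (i : Int) => PySem.Set.update acc (PySem.List.pyGetD list_data i [])) := by
      funext acc i; exact pv_inner_update (PySem.List.pyGetD list_data i []) acc
    rw [hstep, ← List.foldl_map, pv_fetch_drop]
  simp only [houter]
  -- B's sorted flat list has the same members.
  set flat := PySem.List.sorted ((list_data.drop 1).flatMap (fun b => b)) (fun x => x) false with hflat
  have hs : flat.Pairwise (· ≤ ·) := PySem.List.sorted_pairwise _ _
  have hfound := pvBsearch_found_iff flat id_data hs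
  have hmemflat : id_data ∈ flat ↔ ∃ b ∈ list_data.drop 1, id_data ∈ b := by
    rw [hflat, PySem.List.mem_sorted, List.mem_flatMap]
  by_cases hid : id_data ∈ (list_data.drop 1).foldl PySem.Set.update PySem.Set.empty
  · have h1 : PySem.Set.contains ((list_data.drop 1).foldl PySem.Set.update PySem.Set.empty) id_data = true := by
      simpa [PySem.Set.contains, List.contains_eq_mem] using hid
    rw [h1]
    rcases (pv_mem_foldl_update _ _ _).1 hid with hc | hex
    · exact absurd hc (by simp [PySem.Set.empty])
    · have hin : id_data ∈ flat := hmemflat.mpr hex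
      obtain ⟨ha, hb⟩ := hfound.mpr hin
      rw [pv_getD_eq flat _ ha] at hb
      simp [ha, hb]
  · have h1 : PySem.Set.contains ((list_data.drop 1).foldl PySem.Set.update PySem.Set.empty) id_data = false := by
      simpa [PySem.Set.contains, List.contains_eq_mem] using hid
    rw [h1]
    have hnot : ¬ ((pvBsearch flat id_data 0 flat.length < flat.length) ∧
        flat.getD (pvBsearch flat id_data 0 flat.length) 0 = id_data) := by
      intro hcontra
      exact hid ((pv_mem_foldl_update _ _ _).2 (Or.inr (hmemflat.mp (hfound.mp hcontra))))
    rcases Classical.em (pvBsearch flat id_data 0 flat.length < flat.length) with hlt | hlt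
    · have hne : flat.getD (pvBsearch flat id_data 0 flat.length) 0 ≠ id_data := fun he => hnot ⟨hlt, he⟩
      rw [pv_getD_eq flat _ hlt] at hne
      simp [hlt, hne]
    · simp [hlt]
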